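-- pv_equiv track=rewrite | github.com/mqwb666/DAB | 点格棋（终）.py | remove_same
-- ===== SOURCE A (Python) =====
-- def remove_same(s):
--     res_s=[[s[0]]]
--     for _s in s[1::]:
--         f=0
--         for rs in res_s:
--             for r in rs:
--                 if r[0] == _s[0]:
--                     res_s[res_s.index(rs)].append(_s)
--                     f=1
--                     break
--                 if r[1] == 3 and r[0]+ 1 == _s[0] :
--                     res_s[res_s.index(rs)].append(_s)
--                     f=1
--                     break
--                 if r[1]==4 and r[0]+5==_s[0]:
--                     res_s[res_s.index(rs)].append(_s)
--                     f=1
--                     break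
--                 if r[1]==4 and _s[1]==3 and r[0] +4==_s[0]:
--                     res_s[res_s.index(rs)].append(_s)
--                     f=1
--                     break
--             if f==1:
--                 break
--         if f ==0:
--             res_s.append([_s])
--
--
--     return len([ i[0] for i in res_s])
-- ===== SOURCE B (Python) =====
-- def remove_same(s):
--     # One pass with three hash indexes: for each key value, the smallest group id
--     # that contains a member with that first component (d0), or with that first
--     # component and second component 3 (d3) / 4 (d4).  The group an element joins
--     # is the minimum over the four rule lookups; O(n) instead of O(n^2).
--     d0 = {}
--     d3 = {}
--     d4 = {}
--     count = 0
--     for e in s: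
--         x, y = e[0], e[1]
--         cands = []
--         if x in d0:
--             cands.append(d0[x])
--         if x - 1 in d3:
--             cands.append(d3[x - 1])
--         if x - 5 in d4:
--             cands.append(d4[x - 5])
--         if y == 3 and x - 4 in d4:
--             cands.append(d4[x - 4])
--         if cands:
--             g = min(cands)
--         else:
--             g = count
--             count += 1
--         d0[x] = min(d0.get(x, g), g)
--         if y == 3:
--             d3[x] = min(d3.get(x, g), g)
--         if y == 4:
--             d4[x] = min(d4.get(x, g), g)
--     return count
-- ===== Notes on version B (the rewrite author's own statement) =====
-- stated objective: faster
-- what changed: A scans all existing groups and all their members for each new element (and re-finds the group with list.index); B makes one pass keeping three dicts that map a key value to the minimal group id containing a member with that first component (any / second==3 / second==4), so each element picks its group as a min of at most four O(1) lookups.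
-- outside the precondition, e.g. on remove_same([[5]]): A returns 1, B raises IndexError; on remove_same([[5], [5]]): A returns 1, B raises IndexError
import Mathlib
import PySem

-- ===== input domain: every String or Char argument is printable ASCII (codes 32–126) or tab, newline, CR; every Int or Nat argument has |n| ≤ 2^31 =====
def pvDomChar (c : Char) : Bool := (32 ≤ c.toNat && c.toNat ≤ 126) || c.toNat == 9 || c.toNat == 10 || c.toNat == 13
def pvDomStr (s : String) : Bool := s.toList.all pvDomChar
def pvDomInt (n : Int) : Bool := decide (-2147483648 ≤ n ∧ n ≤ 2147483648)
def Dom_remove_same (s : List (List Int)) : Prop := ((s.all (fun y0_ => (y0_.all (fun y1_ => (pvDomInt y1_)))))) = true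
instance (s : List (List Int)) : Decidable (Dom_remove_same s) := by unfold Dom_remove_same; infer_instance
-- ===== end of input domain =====

-- B replaces A's quadratic scan over all groups/members by three hash indexes mapping a key
-- value to the minimal group id containing it (one pass, O(n)); same return value on Pre_.

-- ===== PORT A =====
-- r[0] / r[1] with default 0 (Pre_ guarantees the index is in range where Python reads it)
def pvKey0 (r : List Int) : Int := PySem.List.pyGetD r 0 0
def pvKey1 (r : List Int) : Int := PySem.List.pyGetD r 1 0

-- the inner 'for r in rs' loop with its four if/break branches (f=1 ⇝ true)
def pvScan (rs : List (List Int)) (e : List Int) : Bool :=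
  match rs with
  | [] => false
  | r :: rest =>
    if pvKey0 r == pvKey0 e then true
    else if pvKey1 r == 3 && pvKey0 r + 1 == pvKey0 e then true
    else if pvKey1 r == 4 && pvKey0 r + 5 == pvKey0 e then true
    else if pvKey1 r == 4 && pvKey1 e == 3 && pvKey0 r + 4 == pvKey0 e then true
    else pvScan rest e

-- the body of the outer 'for _s in s[1::]' loop: first group rs whose scan sets f=1 gets _s
-- appended at position res_s.index(rs); otherwise a new group [_s] is appended
def pvStepA (res : List (List (List Int))) (e : List Int) : List (List (List Int)) :=
  match res.find? (fun rs => pvScan rs e) with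
  | some rs =>
    match PySem.List.index? res rs with
    | some i => res.set i ((res.getD i []) ++ [e])
    | none => res
  | none => res ++ [[e]]

def remove_same (s : List (List Int)) : Int :=
  let res := (PySem.List.slice s (some 1) none).foldl pvStepA [[PySem.List.pyGetD s 0 []]]
  ((res.map (fun i => PySem.List.pyGetD i 0 [])).length : Int)

-- ===== PORT B =====
-- the four conditional appends building cands in Source B (last one only when y == 3)
def pvCands (o0 o3 o5 o4 : Option Int) (y3 : Bool) : List Int :=
  let cands : List Int := []
  let cands := match o0 with | some v => cands ++ [v] | none => cands
  let cands := match o3 with | some v => cands ++ [v] | none => cands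
  let cands := match o5 with | some v => cands ++ [v] | none => cands
  if y3 then (match o4 with | some v => cands ++ [v] | none => cands) else cands

-- state: (count, d0, d3, d4) as in Source B
def pvStepB (st : Int × PySem.Dict Int Int × PySem.Dict Int Int × PySem.Dict Int Int)
    (e : List Int) : Int × PySem.Dict Int Int × PySem.Dict Int Int × PySem.Dict Int Int :=
  let x := PySem.List.pyGetD e 0 0
  let y := PySem.List.pyGetD e 1 0
  let cands := pvCands (st.2.1.get? x) (st.2.2.1.get? (x - 1)) (st.2.2.2.get? (x - 5))
      (st.2.2.2.get? (x - 4)) (y == 3)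
  let gc : Int × Int :=
    match PySem.List.min? cands (fun v => v) with
    | some m => (m, st.1)
    | none => (st.1, st.1 + 1)
  let g := gc.1
  let d0 := st.2.1.insert x (min (st.2.1.getD x g) g)
  let d3 := if y == 3 then st.2.2.1.insert x (min (st.2.2.1.getD x g) g) else st.2.2.1
  let d4 := if y == 4 then st.2.2.2.insert x (min (st.2.2.2.getD x g) g) else st.2.2.2
  (gc.2, d0, d3, d4)

def remove_same_alt (s : List (List Int)) : Int :=
  (s.foldl pvStepB (0, PySem.Dict.empty, PySem.Dict.empty, PySem.Dict.empty)).1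

-- ===== PRECONDITION & SPEC =====
-- Pre_ excludes the empty list (A raises IndexError on s[0]) and lists containing an element
-- shorter than 2, on which A raises IndexError as soon as a comparison reads the missing
-- r[1]/_s[1] (on a few such inputs every comparison short-circuits and A still returns; B
-- itself raises IndexError there, so they stay excluded — see the cites).
def Pre_remove_same (s : List (List Int)) : Prop := s ≠ [] ∧ ∀ e ∈ s, 2 ≤ e.length
instance (s : List (List Int)) : Decidable (Pre_remove_same s) := by
  unfold Pre_remove_same; infer_instance
def pvWitness_remove_same : List (List Int) := [[1, 3], [2, 4], [7, 0]]

def Spec_remove_same (s : List (List Int)) (out : Int) : Prop := out = remove_same_alt s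
instance (s : List (List Int)) (out : Int) : Decidable (Spec_remove_same s out) := by
  unfold Spec_remove_same; infer_instance

-- ===== CLAIM (what is proved, stated in full; the proofs are below) =====
def Claim_equal_remove_same : Prop :=
  ∀ (s : List (List Int)), Dom_remove_same s → Pre_remove_same s →
    Spec_remove_same s (remove_same s)
-- ===== LEMMAS AND PROOFS =====

-- minimum of two optional indices (none = +∞)
def pvOMin : Option Nat → Option Nat → Option Nat
  | none, b => b
  | some i, none => some i
  | some i, some j => some (min i j)

-- the three member predicates B indexes by
def pvP0 (v : Int) (r : List Int) : Bool := pvKey0 r == v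
def pvP3 (v : Int) (r : List Int) : Bool := pvKey1 r == 3 && pvKey0 r == v
def pvP4 (v : Int) (r : List Int) : Bool := pvKey1 r == 4 && pvKey0 r == v

-- A's match condition for a member r against the new element e, in shifted form
def pvMatch (e r : List Int) : Bool :=
  pvP0 (pvKey0 e) r || pvP3 (pvKey0 e - 1) r || pvP4 (pvKey0 e - 5) r ||
    (pvKey1 e == 3 && pvP4 (pvKey0 e - 4) r)

-- first group index containing a member satisfying p
def pvFIdx (p : List Int → Bool) (res : List (List (List Int))) : Option Nat :=
  res.findIdx? (fun rs => rs.any p)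

-- the common mid-point step: append e to the first matching group, else open a new group
def pvStepC (res : List (List (List Int))) (e : List Int) : List (List (List Int)) :=
  match res.findIdx? (fun rs => rs.any (pvMatch e)) with
  | some i => res.set i ((res.getD i []) ++ [e])
  | none => res ++ [[e]]

def pvInv (res : List (List (List Int)))
    (st : Int × PySem.Dict Int Int × PySem.Dict Int Int × PySem.Dict Int Int) : Prop :=
  st.1 = (res.length : Int)
  ∧ (∀ v, st.2.1.get? v = (pvFIdx (pvP0 v) res).map (fun n => (n : Int)))
  ∧ (∀ v, st.2.2.1.get? v = (pvFIdx (pvP3 v) res).map (fun n => (n : Int)))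
  ∧ (∀ v, st.2.2.2.get? v = (pvFIdx (pvP4 v) res).map (fun n => (n : Int)))
  ∧ (res.map (fun g => pvKey0 (g.headD []))).Nodup
  ∧ (∀ g ∈ res, g ≠ [])

lemma pvShift (a b c : Int) : (a + c == b) = (a == b - c) := by
  rcases eq_or_ne (a + c) b with h | h <;> simp [h, beq_iff_eq] <;> omega

lemma pvScan_eq_any (rs : List (List Int)) (e : List Int) :
    pvScan rs e = rs.any (pvMatch e) := by
  induction rs with
  | nil => simp [pvScan]
  | cons r t ih =>
    simp only [pvScan, List.any_cons, ih, pvMatch, pvP0, pvP3, pvP4, pvShift]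
    cases h1 : (pvKey0 r == pvKey0 e) <;> cases h2 : (pvKey1 r == (3 : Int)) <;>
      cases h3 : (pvKey1 r == (4 : Int)) <;> cases h4 : (pvKey1 e == (3 : Int)) <;>
        cases h5 : (pvKey0 r == pvKey0 e - 1) <;> cases h6 : (pvKey0 r == pvKey0 e - 5) <;>
          cases h7 : (pvKey0 r == pvKey0 e - 4) <;>
            simp [h1, h2, h3, h4, h5, h6, h7]

lemma pvFindIdx_or {α : Type} (p q : α → Bool) (l : List α) :
    List.findIdx? (fun a => p a || q a) l = pvOMin (List.findIdx? p l) (List.findIdx? q l) := by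
  induction l with
  | nil => simp [pvOMin]
  | cons a t ih =>
    simp only [List.findIdx?_cons, ih]
    by_cases hp : p a <;> by_cases hq : q a <;>
      cases hP : List.findIdx? p t <;> cases hQ : List.findIdx? q t <;>
        simp [hp, hq, hP, hQ, pvOMin] <;> omega

lemma pvAny_or {α : Type} (p q : α → Bool) (l : List α) :
    l.any (fun a => p a || q a) = (l.any p || l.any q) := by
  induction l with
  | nil => simp
  | cons a t ih => simp [List.any_cons, ih]; cases p a <;> cases q a <;> simp

lemma pvFIdx_or (P Q : List Int → Bool) (res : List (List (List Int))) :
    pvFIdx (fun r => P r || Q r) res = pvOMin (pvFIdx P res) (pvFIdx Q res) := by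
  unfold pvFIdx
  rw [← pvFindIdx_or]
  congr 1
  funext rs
  exact pvAny_or P Q rs

lemma pvFIdx_false (res : List (List (List Int))) :
    pvFIdx (fun _ => false) res = none := by
  rw [pvFIdx, List.findIdx?_eq_none_iff]
  intro rs _
  simp

lemma pvFIdx_match (e : List Int) (res : List (List (List Int))) :
    res.findIdx? (fun rs => rs.any (pvMatch e)) =
      pvOMin (pvOMin (pvOMin (pvFIdx (pvP0 (pvKey0 e)) res) (pvFIdx (pvP3 (pvKey0 e - 1)) res))
          (pvFIdx (pvP4 (pvKey0 e - 5)) res))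
        (if pvKey1 e == 3 then pvFIdx (pvP4 (pvKey0 e - 4)) res else none) := by
  have h : res.findIdx? (fun rs => rs.any (pvMatch e)) = pvFIdx (pvMatch e) res := rfl
  rw [h]
  unfold pvMatch
  rw [pvFIdx_or, pvFIdx_or, pvFIdx_or]
  by_cases hy : pvKey1 e = 3
  · have : (fun r => pvKey1 e == 3 && pvP4 (pvKey0 e - 4) r) = pvP4 (pvKey0 e - 4) := by
      funext r; simp [hy]
    rw [this, if_pos (by simp [hy])]
  · have : (fun r => pvKey1 e == 3 && pvP4 (pvKey0 e - 4) r) = (fun _ => false) := by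
      funext r; simp [hy]
    rw [this, pvFIdx_false, if_neg (by simp [hy])]

lemma pvFIdx_lt {p : List Int → Bool} {res : List (List (List Int))} {i : Nat}
    (h : pvFIdx p res = some i) : i < res.length := by
  rw [pvFIdx, List.findIdx?_eq_some_iff_findIdx_eq] at h
  exact h.1

lemma pvFIdx_set_append (P : List Int → Bool) (e : List Int) :
    ∀ (res : List (List (List Int))) (i : Nat), i < res.length →
    pvFIdx P (res.set i ((res.getD i []) ++ [e])) =
      if P e then pvOMin (pvFIdx P res) (some i) else pvFIdx P res := by
  intro res
  induction res with
  | nil => intro i hi; simp at hi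
  | cons h t ih =>
    intro i hi
    cases i with
    | zero =>
      simp only [pvFIdx, List.set_cons_zero, List.getD_cons_zero, List.findIdx?_cons,
        List.any_append, List.any_cons, List.any_nil]
      by_cases hPe : P e <;> by_cases hh : h.any P <;>
        cases hT : List.findIdx? (fun rs => rs.any P) t <;>
          simp [hPe, hh, hT, pvOMin] <;> omega
    | succ j =>
      have hj : j < t.length := by simpa using hi
      have hrec := ih j hj
      simp only [pvFIdx] at hrec ⊢
      simp only [List.set_cons_succ, List.getD_cons_succ, List.findIdx?_cons, hrec]
      by_cases hPe : P e <;> by_cases hh : h.any P <;>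
        cases hT : List.findIdx? (fun rs => rs.any P) t <;>
          simp [hPe, hh, hT, pvOMin] <;> omega

lemma pvFIdx_append (P : List Int → Bool) (e : List Int) (res : List (List (List Int))) :
    pvFIdx P (res ++ [[e]]) =
      (pvFIdx P res).or (if P e then some res.length else none) := by
  rw [pvFIdx, List.findIdx?_append]
  congr 1
  by_cases hPe : P e <;> simp [hPe, List.findIdx?_cons]

lemma pvFIdx_none_forall {p : List Int → Bool} {res : List (List (List Int))}
    (h : pvFIdx p res = none) : ∀ g ∈ res, ∀ r ∈ g, p r = false := by
  rw [pvFIdx, List.findIdx?_eq_none_iff] at h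
  intro g hg r hr
  have := h g hg
  rw [List.any_eq_false] at this
  simpa using this r hr

-- A's step equals the mid-point step on a duplicate-free group list
lemma pvStepA_eq_stepC {res : List (List (List Int))} (e : List Int) (hnd : res.Nodup) :
    pvStepA res e = pvStepC res e := by
  have hfun : (fun rs => pvScan rs e) = (fun rs => rs.any (pvMatch e)) := by
    funext rs; exact pvScan_eq_any rs e
  unfold pvStepA pvStepC
  rw [hfun]
  cases hf : List.findIdx? (fun rs => rs.any (pvMatch e)) res with
  | none =>
    have : res.find? (fun rs => rs.any (pvMatch e)) = none := by
      rw [List.find?_eq_none]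
      intro x hx
      rw [List.findIdx?_eq_none_iff] at hf
      simp [hf x hx]
    rw [this]
  | some i =>
    rw [List.findIdx?_eq_some_iff_getElem] at hf
    obtain ⟨hi, hp, hmin⟩ := hf
    have hfind : res.find? (fun rs => rs.any (pvMatch e)) = some res[i] := by
      rw [List.find?_eq_some_iff_getElem]
      exact ⟨hp, i, hi, rfl, fun j hj => by simpa using hmin j hj⟩
    rw [hfind]
    have hidx : PySem.List.index? res res[i] = some i := by
      rw [PySem.List.index?_eq_some_iff]
      refine ⟨res.take i, res.drop (i + 1), ?_, by simp [hi.le], ?_⟩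
      · conv_lhs => rw [← List.take_append_drop i res]
        rw [List.drop_eq_getElem_cons hi]
      · intro hmem
        rw [List.mem_take_iff_getElem] at hmem
        obtain ⟨j, hj, hje⟩ := hmem
        have hjlt : j < i := lt_of_lt_of_le (lt_min_iff.mp hj).1 le_rfl
        exact absurd ((List.Nodup.getElem_inj_iff hnd).mp hje) (Nat.ne_of_lt hjlt)
    rw [PySem.List.index?_eq_idxOf?] at hidx
    simp [hfind, hidx]

-- groups with pairwise-distinct head keys are pairwise distinct lists
lemma pvNodup_of_heads {res : List (List (List Int))}
    (hnd : (res.map (fun g => pvKey0 (g.headD []))).Nodup) : res.Nodup :=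
  List.Nodup.of_map _ hnd

-- head of a nonempty group survives appending
lemma pvHeadD_append {g : List (List Int)} (hg : g ≠ []) (e : List Int) :
    (g ++ [e]).headD [] = g.headD [] := by
  cases g with
  | nil => exact absurd rfl hg
  | cons a t => rfl

-- the candidate minimum computed by B equals the minimum of the optional indices
lemma pvMin_pvCands (a b c d : Option Nat) (y3 : Bool) :
    PySem.List.min? (pvCands (a.map (fun n => (n : Int))) (b.map (fun n => (n : Int)))
        (c.map (fun n => (n : Int))) (d.map (fun n => (n : Int))) y3) (fun v => v) =
      (pvOMin (pvOMin (pvOMin a b) c) (if y3 then d else none)).map (fun n => (n : Int)) := by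
  cases y3 <;> cases a <;> cases b <;> cases c <;> cases d <;>
    simp [pvCands, pvOMin, PySem.List.min?_id_cons] <;> omega


lemma pvOMin_eq_none {a b : Option Nat} : pvOMin a b = none ↔ a = none ∧ b = none := by
  cases a <;> cases b <;> simp [pvOMin]

lemma pvHeadD_mem {g : List (List Int)} (hg : g ≠ []) : g.headD [] ∈ g := by
  cases g with
  | nil => exact absurd rfl hg
  | cons a t => simp

-- dictionary invariant preservation, append-to-group case, key pattern active on e
lemma pvDict_set_act (pk : Int → List Int → Bool) (d : PySem.Dict Int Int) (x : Int)
    (res : List (List (List Int))) (i : Nat) (e : List Int) (hi : i < res.length)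
    (hd : ∀ v, d.get? v = (pvFIdx (pk v) res).map (fun n => (n : Int)))
    (hact : ∀ v, pk v e = (x == v)) :
    ∀ v, (d.insert x (min (d.getD x (i : Int)) (i : Int))).get? v =
      (pvFIdx (pk v) (res.set i ((res.getD i []) ++ [e]))).map (fun n => (n : Int)) := by
  intro v
  rw [pvFIdx_set_append _ _ res i hi, PySem.Dict.get?_insert, hact]
  by_cases hv : v = x
  · subst hv
    cases hF : pvFIdx (pk v) res <;>
      simp [pvOMin, hF, PySem.Dict.getD_eq_get?_getD, hd v] <;> omega
  · have : (x == v) = false := by simp [beq_iff_eq]; omega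
    simp [hv, this, hd v]

-- same, key pattern inactive on e
lemma pvDict_set_inact (pk : Int → List Int → Bool) (d : PySem.Dict Int Int)
    (res : List (List (List Int))) (i : Nat) (e : List Int) (hi : i < res.length)
    (hd : ∀ v, d.get? v = (pvFIdx (pk v) res).map (fun n => (n : Int)))
    (hinact : ∀ v, pk v e = false) :
    ∀ v, d.get? v = (pvFIdx (pk v) (res.set i ((res.getD i []) ++ [e]))).map (fun n => (n : Int)) := by
  intro v
  rw [pvFIdx_set_append _ _ res i hi, hinact]
  simp [hd v]

-- dictionary invariant preservation, new-group case, key pattern active on e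
lemma pvDict_app_act (pk : Int → List Int → Bool) (d : PySem.Dict Int Int) (x : Int)
    (res : List (List (List Int))) (e : List Int)
    (hd : ∀ v, d.get? v = (pvFIdx (pk v) res).map (fun n => (n : Int)))
    (hact : ∀ v, pk v e = (x == v)) :
    ∀ v, (d.insert x (min (d.getD x (res.length : Int)) (res.length : Int))).get? v =
      (pvFIdx (pk v) (res ++ [[e]])).map (fun n => (n : Int)) := by
  intro v
  rw [pvFIdx_append, PySem.Dict.get?_insert, hact]
  by_cases hv : v = x
  · subst hv
    cases hF : pvFIdx (pk v) res with
    | none => simp [hF, PySem.Dict.getD_eq_get?_getD, hd v]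
    | some j =>
      have hj : j < res.length := pvFIdx_lt hF
      simp [hF, PySem.Dict.getD_eq_get?_getD, hd v]
      omega
  · have : (x == v) = false := by simp [beq_iff_eq]; omega
    simp [hv, this, hd v]

-- same, key pattern inactive on e
lemma pvDict_app_inact (pk : Int → List Int → Bool) (d : PySem.Dict Int Int)
    (res : List (List (List Int))) (e : List Int)
    (hd : ∀ v, d.get? v = (pvFIdx (pk v) res).map (fun n => (n : Int)))
    (hinact : ∀ v, pk v e = false) :
    ∀ v, d.get? v = (pvFIdx (pk v) (res ++ [[e]])).map (fun n => (n : Int)) := by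
  intro v
  rw [pvFIdx_append, hinact]
  simp [hd v]

lemma pvP3_act (e : List Int) (hy : pvKey1 e = 3) : ∀ v, pvP3 v e = (pvKey0 e == v) := by
  intro v; simp [pvP3, hy]

lemma pvP3_inact (e : List Int) (hy : pvKey1 e ≠ 3) : ∀ v, pvP3 v e = false := by
  intro v; simp [pvP3, hy]

lemma pvP4_act (e : List Int) (hy : pvKey1 e = 4) : ∀ v, pvP4 v e = (pvKey0 e == v) := by
  intro v; simp [pvP4, hy]

lemma pvP4_inact (e : List Int) (hy : pvKey1 e ≠ 4) : ∀ v, pvP4 v e = false := by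
  intro v; simp [pvP4, hy]

-- heads stay duplicate-free and groups stay nonempty
lemma pvHeads_set {res : List (List (List Int))} {i : Nat} (hi : i < res.length) (e : List Int)
    (hnd : (res.map (fun g => pvKey0 (g.headD []))).Nodup)
    (hne : ∀ g ∈ res, g ≠ []) :
    ((res.set i ((res.getD i []) ++ [e])).map (fun g => pvKey0 (g.headD []))).Nodup := by
  have hgd : res.getD i [] = res[i] := by
    rw [List.getD_eq_getElem?_getD, List.getElem?_eq_getElem hi]; rfl
  have hmem : res[i] ∈ res := List.getElem_mem hi
  rw [List.map_set]
  have : pvKey0 ((res.getD i [] ++ [e]).headD []) = pvKey0 (res[i].headD []) := by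
    rw [hgd, pvHeadD_append (hne _ hmem) e]
  rw [this]
  have : (List.map (fun g => pvKey0 (g.headD [])) res).set i (pvKey0 (res[i].headD [])) =
      List.map (fun g => pvKey0 (g.headD [])) res := by
    have hi' : i < (List.map (fun g => pvKey0 (g.headD [])) res).length := by simpa using hi
    have := List.set_getElem_self (as := List.map (fun g => pvKey0 (g.headD [])) res) (i := i) hi'
    simpa using this
  rw [this]
  exact hnd

lemma pvHeads_app {res : List (List (List Int))} {e : List Int}
    (hnd : (res.map (fun g => pvKey0 (g.headD []))).Nodup)
    (hne : ∀ g ∈ res, g ≠ [])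
    (hF0 : pvFIdx (pvP0 (pvKey0 e)) res = none) :
    ((res ++ [[e]]).map (fun g => pvKey0 (g.headD []))).Nodup := by
  rw [List.map_append, List.nodup_append]
  refine ⟨hnd, by simp, ?_⟩
  intro a ha b hb
  simp only [List.mem_map] at ha
  obtain ⟨g, hg, hga⟩ := ha
  simp only [List.map_cons, List.map_nil, List.mem_singleton] at hb
  subst hb
  have hhead := pvHeadD_mem (hne g hg)
  have := pvFIdx_none_forall hF0 g hg _ hhead
  simp only [pvP0, beq_iff_eq] at this
  simpa [← hga] using this

lemma pvNe_set {res : List (List (List Int))} {i : Nat} (e : List Int)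
    (hne : ∀ g ∈ res, g ≠ []) :
    ∀ g ∈ res.set i ((res.getD i []) ++ [e]), g ≠ [] := by
  intro g hg
  rcases List.mem_or_eq_of_mem_set hg with h | h
  · exact hne g h
  · subst h; simp

-- the main step lemma: one loop iteration preserves the full invariant
lemma pvStep_inv (res : List (List (List Int))) (c : Int) (d0 d3 d4 : PySem.Dict Int Int)
    (e : List Int) (h : pvInv res (c, d0, d3, d4)) :
    pvInv (pvStepC res e) (pvStepB (c, d0, d3, d4) e) := by
  obtain ⟨hc, h0, h3, h4, hnd, hne⟩ := h
  simp only at hc h0 h3 h4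
  have hx : PySem.List.pyGetD e 0 0 = pvKey0 e := rfl
  have hy : PySem.List.pyGetD e 1 0 = pvKey1 e := rfl
  have hcands : PySem.List.min?
      (pvCands (d0.get? (pvKey0 e)) (d3.get? (pvKey0 e - 1)) (d4.get? (pvKey0 e - 5))
        (d4.get? (pvKey0 e - 4)) (pvKey1 e == 3)) (fun v => v) =
      (List.findIdx? (fun rs => rs.any (pvMatch e)) res).map (fun n => (n : Int)) := by
    rw [h0, h3, h4, h4, pvMin_pvCands, ← pvFIdx_match]
  simp only [pvStepB, hx, hy, hcands]
  cases hm : List.findIdx? (fun rs => rs.any (pvMatch e)) res with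
  | some i =>
    have hi : i < res.length :=
      pvFIdx_lt (show pvFIdx (pvMatch e) res = some i from hm)
    have hC : pvStepC res e = res.set i ((res.getD i []) ++ [e]) := by
      simp [pvStepC, hm]
    rw [hC]
    refine ⟨?_, ?_, ?_, ?_, ?_, ?_⟩
    · simp only [List.length_set]
      exact hc
    · intro v
      exact pvDict_set_act pvP0 d0 (pvKey0 e) res i e hi h0 (fun v => rfl) v
    · intro v
      by_cases hy3 : pvKey1 e = 3
      · simpa [hy3] using pvDict_set_act pvP3 d3 (pvKey0 e) res i e hi h3 (pvP3_act e hy3) v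
      · simpa [hy3] using pvDict_set_inact pvP3 d3 res i e hi h3 (pvP3_inact e hy3) v
    · intro v
      by_cases hy4 : pvKey1 e = 4
      · simpa [hy4] using pvDict_set_act pvP4 d4 (pvKey0 e) res i e hi h4 (pvP4_act e hy4) v
      · simpa [hy4] using pvDict_set_inact pvP4 d4 res i e hi h4 (pvP4_inact e hy4) v
    · exact pvHeads_set hi e hnd hne
    · exact pvNe_set e hne
  | none =>
    have hF0 : pvFIdx (pvP0 (pvKey0 e)) res = none := by
      have := pvFIdx_match e res
      rw [hm] at this
      exact (pvOMin_eq_none.mp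
        (pvOMin_eq_none.mp (pvOMin_eq_none.mp this.symm).1).1).1
    have hC : pvStepC res e = res ++ [[e]] := by
      simp [pvStepC, hm]
    rw [hC]
    refine ⟨?_, ?_, ?_, ?_, ?_, ?_⟩
    · show c + 1 = (((res ++ [[e]]).length : Nat) : Int)
      simp only [List.length_append, List.length_cons, List.length_nil]
      push_cast
      omega
    · intro v
      simpa [hc] using pvDict_app_act pvP0 d0 (pvKey0 e) res e h0 (fun v => rfl) v
    · intro v
      by_cases hy3 : pvKey1 e = 3
      · simpa [hy3, hc] using pvDict_app_act pvP3 d3 (pvKey0 e) res e h3 (pvP3_act e hy3) v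
      · simpa [hy3, hc] using pvDict_app_inact pvP3 d3 res e h3 (pvP3_inact e hy3) v
    · intro v
      by_cases hy4 : pvKey1 e = 4
      · simpa [hy4, hc] using pvDict_app_act pvP4 d4 (pvKey0 e) res e h4 (pvP4_act e hy4) v
      · simpa [hy4, hc] using pvDict_app_inact pvP4 d4 res e h4 (pvP4_inact e hy4) v
    · exact pvHeads_app hnd hne hF0
    · intro g hg
      rcases List.mem_append.mp hg with h | h
      · exact hne g h
      · simp only [List.mem_singleton] at h
        subst h
        simp

-- folding the loop preserves the invariant and keeps A's fold equal to the mid-point fold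
lemma pvFold (l : List (List Int)) :
    ∀ (res : List (List (List Int))) (c : Int) (d0 d3 d4 : PySem.Dict Int Int),
      pvInv res (c, d0, d3, d4) →
      l.foldl pvStepA res = l.foldl pvStepC res ∧
        pvInv (l.foldl pvStepC res) (l.foldl pvStepB (c, d0, d3, d4)) := by
  induction l with
  | nil => intro res c d0 d3 d4 h; exact ⟨rfl, h⟩
  | cons e t ih =>
    intro res c d0 d3 d4 h
    have hA : pvStepA res e = pvStepC res e :=
      pvStepA_eq_stepC e (pvNodup_of_heads h.2.2.2.2.1)
    have h' := pvStep_inv res c d0 d3 d4 e h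
    have hrec := ih (pvStepC res e) (pvStepB (c, d0, d3, d4) e).1
      (pvStepB (c, d0, d3, d4) e).2.1 (pvStepB (c, d0, d3, d4) e).2.2.1
      (pvStepB (c, d0, d3, d4) e).2.2.2 (by simpa using h')
    simp only [List.foldl_cons, hA]
    simpa using hrec

lemma pvInv_nil : pvInv [] (0, PySem.Dict.empty, PySem.Dict.empty, PySem.Dict.empty) := by
  refine ⟨by simp, ?_, ?_, ?_, by simp, by simp⟩ <;>
    intro v <;> simp [pvFIdx, PySem.Dict.get?_empty]

-- ===== VERDICT (by name: the statement is the Claim_ definition above) =====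
theorem remove_same_spec : Claim_equal_remove_same := by
  unfold Claim_equal_remove_same
  intro s _ hpre
  unfold Spec_remove_same
  obtain ⟨hs, -⟩ := hpre
  cases s with
  | nil => exact absurd rfl hs
  | cons e0 t =>
    have hC0 : pvStepC [] e0 = [[e0]] := by simp [pvStepC]
    have h1 := pvStep_inv [] 0 PySem.Dict.empty PySem.Dict.empty PySem.Dict.empty e0 pvInv_nil
    rw [hC0] at h1
    obtain ⟨hAC, hinv⟩ := pvFold t [[e0]]
      (pvStepB (0, PySem.Dict.empty, PySem.Dict.empty, PySem.Dict.empty) e0).1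
      (pvStepB (0, PySem.Dict.empty, PySem.Dict.empty, PySem.Dict.empty) e0).2.1
      (pvStepB (0, PySem.Dict.empty, PySem.Dict.empty, PySem.Dict.empty) e0).2.2.1
      (pvStepB (0, PySem.Dict.empty, PySem.Dict.empty, PySem.Dict.empty) e0).2.2.2
      (by simpa using h1)
    have hcount := hinv.1
    simp only [remove_same, remove_same_alt, PySem.List.slice_from_one, List.tail_cons,
      PySem.List.pyGetD_zero_cons, List.foldl_cons, List.length_map]
    rw [hAC]
    simpa using hcount.symm
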